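-- pv_equiv track=rewrite | github.com/ddelange/s3pathlib-project | s3pathlib/utils.py | smart_join_s3_key
-- ===== SOURCE A (Python) =====
-- from typing import Tuple, List, Dict, Iterable, Optional, Any
--
-- def split_parts(key) -> List[str]:
--     """
--     Split s3 key parts using "/" delimiter.
--
--     Example::
--
--         >>> split_parts("a/b/c")
--         ["a", "b", "c"]
--         >>> split_parts("//a//b//c//")
--         ["a", "b", "c"]
--     """
--     return [part for part in key.split("/") if part]
--
-- def smart_join_s3_key(
--     parts: List[str],
--     is_dir: bool,
-- ) -> str:
--     """
--     Note, it assume that there's no such double slack in your path. It ensure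
--     that there's only one consecutive "/" in the s3 key.
--
--     :param parts: list of s3 key path parts, could have "/"
--     :param is_dir: if True, the s3 key ends with "/". otherwise enforce no
--         tailing "/".
--
--     Example::
--
--         >>> smart_join_s3_key(parts=["/a/", "b/", "/c"], is_dir=True)
--         a/b/c/
--         >>> smart_join_s3_key(parts=["/a/", "b/", "/c"], is_dir=False)
--         a/b/c
--     """
--     new_parts = list()
--     for part in parts:
--         new_parts.extend(split_parts(part))
--     key = "/".join(new_parts)
--     if is_dir:
--         return key + "/"
--     else:
--         return key
-- ===== SOURCE B (Python) =====
-- def smart_join_s3_key(parts, is_dir):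
--     # Character-level streaming pass: copy characters, collapsing runs of "/"
--     # and dropping a leading "/"; no splitting, filtering or joining at all.
--     out = []
--     for part in parts:
--         for ch in part + "/":  # virtual "/" terminator closes the last token
--             if ch == "/":
--                 if out and out[-1] != "/":
--                     out.append("/")
--             else:
--                 out.append(ch)
--     if out and out[-1] == "/":
--         out.pop()
--     key = "".join(out)
--     return key + "/" if is_dir else key
-- ===== Notes on version B (the rewrite author's own statement) =====
-- stated objective: alternative
-- what changed: B replaces A's split-filter-join pipeline (split each part on '/', collect nonempty tokens, rejoin) with a single character-level streaming state machine that copies characters while collapsing slash runs, dropping a leading slash and trimming the trailing one.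
import Mathlib
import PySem

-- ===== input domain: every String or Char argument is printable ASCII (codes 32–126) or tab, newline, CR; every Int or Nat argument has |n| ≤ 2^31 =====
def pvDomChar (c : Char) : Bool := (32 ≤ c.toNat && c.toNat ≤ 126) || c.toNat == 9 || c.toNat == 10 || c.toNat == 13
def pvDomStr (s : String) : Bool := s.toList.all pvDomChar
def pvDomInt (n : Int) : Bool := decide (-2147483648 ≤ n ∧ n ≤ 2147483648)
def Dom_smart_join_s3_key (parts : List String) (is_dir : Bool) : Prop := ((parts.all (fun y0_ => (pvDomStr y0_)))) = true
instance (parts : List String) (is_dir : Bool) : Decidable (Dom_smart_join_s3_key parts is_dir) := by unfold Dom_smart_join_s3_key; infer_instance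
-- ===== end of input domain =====

-- B replaces A's split-filter-join pipeline with one character-level streaming pass that collapses slash runs (alternative decomposition, same cost).

-- ===== PORT A =====
-- helper: Python's split_parts(key) = [part for part in key.split("/") if part]
def split_parts (key : String) : List String :=
  ((PySem.Str.split? key "/").getD []).filter (fun part => part ≠ "")

def smart_join_s3_key (parts : List String) (is_dir : Bool) : String :=
  let new_parts := parts.foldl (fun acc part => acc ++ split_parts part) []
  let key := PySem.Str.join "/" new_parts
  if is_dir then key ++ "/" else key

-- ===== PORT B =====
-- B-side helper: one step of the character machine (the body of B's inner loop)
def pvStep (out : List Char) (ch : Char) : List Char :=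
  if ch = '/' then
    (if out ≠ [] ∧ out.getLast? ≠ some '/' then out ++ ['/'] else out)
  else out ++ [ch]

def smart_join_s3_key_alt (parts : List String) (is_dir : Bool) : String :=
  let out := parts.foldl (fun out part => (part.toList ++ ['/']).foldl pvStep out) []
  let out2 := if out.getLast? = some '/' then out.dropLast else out
  let key := String.ofList out2
  if is_dir then key ++ "/" else key

-- ===== PRECONDITION & SPEC =====
def Spec_smart_join_s3_key (parts : List String) (is_dir : Bool) (out : String) : Prop := out = smart_join_s3_key_alt parts is_dir
instance (parts : List String) (is_dir : Bool) (out : String) : Decidable (Spec_smart_join_s3_key parts is_dir out) := by unfold Spec_smart_join_s3_key; infer_instance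

-- ===== CLAIM (what is proved, stated in full; the proofs are below) =====
def Claim_equal_smart_join_s3_key : Prop := ∀ (parts : List String) (is_dir : Bool), Dom_smart_join_s3_key parts is_dir → Spec_smart_join_s3_key parts is_dir (smart_join_s3_key parts is_dir)

-- ===== LEMMAS AND PROOFS =====

-- nonempty pieces of splitting a char list on '/'
def pvSp (cs : List Char) : List (List Char) :=
  (cs.splitOnP (· == '/')).filter (fun t => t ≠ [])

-- each token of T followed by a closing '/'
def pvGlue (T : List (List Char)) : List Char :=
  (T.map (fun t => t ++ ['/'])).flatten

lemma pv_modifyHead_id {α : Type} (l : List α) : List.modifyHead (fun x => x) l = l := by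
  cases l <;> rfl

-- PySem's fueled splitOn on a one-char separator computes List.splitOnP
lemma pv_go_spec (c : Char) : ∀ (fuel : Nat) (l cur : List Char) (acc : List (List Char)), l.length < fuel →
    PySem.Chars.splitOn.go [c] fuel l cur acc
      = acc.reverse ++ (l.splitOnP (· == c)).modifyHead (cur.reverse ++ ·) := by
  intro fuel
  induction fuel with
  | zero => intro l cur acc h; omega
  | succ fuel ih =>
    intro l cur acc h
    cases l with
    | nil => simp [PySem.Chars.splitOn.go]
    | cons c' rest =>
      have hr : rest.length < fuel := by simpa using h
      by_cases hc : c = c'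
      · subst hc
        have step : PySem.Chars.splitOn.go [c] (fuel+1) (c :: rest) cur acc
            = PySem.Chars.splitOn.go [c] fuel rest [] (cur.reverse :: acc) := by
          simp [PySem.Chars.splitOn.go, List.isPrefixOf]
        rw [step, ih rest [] _ hr]
        simp [List.splitOnP_cons, pv_modifyHead_id]
      · have hpre : List.isPrefixOf [c] (c' :: rest) = false := by
          simp only [List.isPrefixOf, Bool.and_true, beq_eq_false_iff_ne]
          exact hc
        have step : PySem.Chars.splitOn.go [c] (fuel+1) (c' :: rest) cur acc
            = PySem.Chars.splitOn.go [c] fuel rest (c' :: cur) acc := by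
          simp [PySem.Chars.splitOn.go, hpre]
        rw [step, ih rest (c' :: cur) acc hr]
        have hne : rest.splitOnP (· == c) ≠ [] := List.splitOnP_ne_nil _ _
        obtain ⟨hd, tl, heq⟩ := List.exists_cons_of_ne_nil hne
        have hcc : (c' == c) = false := by
          simp only [beq_eq_false_iff_ne]
          exact fun h' => hc h'.symm
        simp [List.splitOnP_cons, hcc, heq]

lemma pv_splitOn_char (c : Char) (cs : List Char) :
    PySem.Chars.splitOn cs [c] = cs.splitOnP (· == c) := by
  rw [PySem.Chars.splitOn, pv_go_spec c (cs.length + 1) cs [] [] (by omega)]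
  simp [pv_modifyHead_id]

-- split_parts through the char-level pvSp
lemma pv_split_parts_eq (key : String) :
    split_parts key = (pvSp key.toList).map String.ofList := by
  have h : PySem.Str.split? key "/" = some ((PySem.Chars.splitOn key.toList ['/']).map String.ofList) := by
    simp [PySem.Str.split?, PySem.Chars.split?]
  rw [split_parts, h]
  rw [pv_splitOn_char]
  simp only [pvSp, Option.getD_some, List.filter_map]
  congr 1
  apply List.filter_congr
  intro t _
  have hiff : String.ofList t = "" ↔ t = [] := by
    constructor
    · intro he
      have := congrArg String.toList he
      simpa [String.toList_ofList] using this
    · intro he; rw [he]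
  simp [hiff]

-- A's accumulator loop is the flatten of the per-part token lists
lemma pv_foldl_flatten (ps : List String) (init : List String) :
    ps.foldl (fun acc part => acc ++ split_parts part) init
      = init ++ (ps.map split_parts).flatten := by
  induction ps generalizing init with
  | nil => simp
  | cons a t ih => simp [ih, List.append_assoc]
lemma pvGlue_ne_nil (T : List (List Char)) (h : T ≠ []) : pvGlue T ≠ [] := by
  obtain ⟨a, t, rfl⟩ := List.exists_cons_of_ne_nil h
  simp [pvGlue]

lemma pvGlue_last (T : List (List Char)) (h : T ≠ []) : (pvGlue T).getLast? = some '/' := by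
  induction T with
  | nil => exact absurd rfl h
  | cons a t ih =>
    cases t with
    | nil => simp [pvGlue]
    | cons b t' =>
      have : pvGlue (a :: b :: t') = (a ++ ['/']) ++ pvGlue (b :: t') := by
        simp [pvGlue]
      rw [this, List.getLast?_append_of_ne_nil _ (pvGlue_ne_nil _ (by simp))]
      exact ih (by simp)

lemma pvGlue_dropLast (T : List (List Char)) : (pvGlue T).dropLast = ['/'].intercalate T := by
  induction T with
  | nil => simp [pvGlue, List.intercalate]
  | cons a t ih =>
    cases t with
    | nil => simp [pvGlue, List.intercalate]
    | cons b t' =>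
      have h1 : pvGlue (a :: b :: t') = (a ++ ['/']) ++ pvGlue (b :: t') := by
        simp [pvGlue]
      have h2 : ['/'].intercalate (a :: b :: t') = a ++ '/' :: ['/'].intercalate (b :: t') := by
        simp [List.intercalate, List.intersperse]
      rw [h1, h2, List.dropLast_append_of_ne_nil (pvGlue_ne_nil _ (by simp)), ih]
      simp

lemma pvSp_nil : pvSp [] = [] := by simp [pvSp]

lemma pvSp_slash_cons (l : List Char) : pvSp ('/' :: l) = pvSp l := by
  simp [pvSp, List.splitOnP_cons]

lemma pvSp_sfree (p : List Char) (hne : p ≠ []) (hs : '/' ∉ p) : pvSp p = [p] := by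
  have h : p.splitOnP (· == '/') = [p] := by
    induction p with
    | nil => exact absurd rfl hne
    | cons c rest ih =>
      have hc : (c == '/') = false := by
        simp only [beq_eq_false_iff_ne]
        exact fun h' => hs (h' ▸ List.mem_cons_self)
      rw [List.splitOnP_cons, hc]
      cases hrest : rest with
      | nil => simp
      | cons d t =>
        rw [← hrest, ih (by simp [hrest]) (fun hm => hs (List.mem_cons_of_mem _ hm))]
        simp
  simp [pvSp, h, hne]

lemma pvSp_append_slash (a b : List Char) : pvSp (a ++ '/' :: b) = pvSp a ++ pvSp b := by
  rw [pvSp, List.splitOnP_append_cons _ _ _ '/' (by simp), List.filter_append]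
  rfl

-- the character machine over cs followed by a closing '/' appends cs's tokens
lemma pv_fold_char : ∀ (cs p : List Char) (T : List (List Char)), '/' ∉ p →
    List.foldl pvStep (pvGlue T ++ p) (cs ++ ['/']) = pvGlue (T ++ pvSp (p ++ cs)) := by
  intro cs
  induction cs with
  | nil =>
    intro p T hp
    simp only [List.nil_append, List.foldl_cons, List.foldl_nil, List.append_nil]
    by_cases hpe : p = []
    · subst hpe
      simp only [List.append_nil, pvSp_nil]
      by_cases hT : T = []
      · subst hT; simp [pvStep, pvGlue]
      · simp [pvStep, pvGlue_last T hT]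
    · have hplast : p.getLast? ≠ some '/' := by
        intro h
        exact hp (List.mem_of_getLast? h)
      have : pvStep (pvGlue T ++ p) '/' = pvGlue T ++ p ++ ['/'] := by
        simp [pvStep, hplast, hpe]
      rw [this, pvSp_sfree p hpe hp]
      simp [pvGlue]
  | cons c rest ih =>
    intro p T hp
    simp only [List.cons_append, List.foldl_cons]
    by_cases hc : c = '/'
    · subst hc
      by_cases hpe : p = []
      · subst hpe
        simp only [List.append_nil]
        have hstep : pvStep (pvGlue T) '/' = pvGlue T := by
          by_cases hT : T = []
          · subst hT; simp [pvStep, pvGlue]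
          · simp [pvStep, pvGlue_last T hT, pvGlue_ne_nil T hT]
        rw [hstep]
        have h := ih [] T (by simp)
        simp only [List.append_nil, List.nil_append] at h
        rw [h]
        simp [pvSp_slash_cons]
      · have hplast : p.getLast? ≠ some '/' := fun h => hp (List.mem_of_getLast? h)
        have hstep : pvStep (pvGlue T ++ p) '/' = pvGlue (T ++ [p]) := by
          simp [pvStep, hplast, hpe, pvGlue]
        rw [hstep]
        have h := ih [] (T ++ [p]) (by simp)
        simp only [List.append_nil, List.nil_append] at h
        rw [h]
        rw [pvSp_append_slash p rest, pvSp_sfree p hpe hp]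
        simp [List.append_assoc]
    · have hstep : pvStep (pvGlue T ++ p) c = pvGlue T ++ (p ++ [c]) := by
        simp [pvStep, hc]
      have hmem : '/' ∉ p ++ [c] := by
        simp only [List.mem_append, List.mem_singleton]
        rintro (h | h)
        · exact hp h
        · exact hc h.symm
      rw [hstep, ih (p ++ [c]) T hmem]
      simp [List.append_assoc]

-- B's outer loop over the parts
lemma pv_fold_parts (ps : List String) (T : List (List Char)) :
    ps.foldl (fun out part => (part.toList ++ ['/']).foldl pvStep out) (pvGlue T)
      = pvGlue (T ++ (ps.map (fun p => pvSp p.toList)).flatten) := by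
  induction ps generalizing T with
  | nil => simp
  | cons a t ih =>
    simp only [List.foldl_cons]
    rw [show pvGlue T = pvGlue T ++ [] from (List.append_nil _).symm,
        pv_fold_char a.toList [] T (by simp)]
    simp only [List.nil_append]
    rw [ih (T ++ pvSp a.toList)]
    simp [List.append_assoc]

-- ===== VERDICT (by name: the statement is the Claim_ definition above) =====
theorem smart_join_s3_key_spec : Claim_equal_smart_join_s3_key := by
  intro parts is_dir _
  unfold Spec_smart_join_s3_key smart_join_s3_key smart_join_s3_key_alt
  set Tall := (parts.map (fun p => pvSp p.toList)).flatten with hTall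
  -- B's buffer after the loops
  have hout : parts.foldl (fun out part => (part.toList ++ ['/']).foldl pvStep out) []
      = pvGlue Tall := by
    have h := pv_fold_parts parts []
    simp only [List.nil_append] at h
    exact h
  -- the trimmed buffer is the '/'-intercalation of the tokens
  have hout2 : (if (pvGlue Tall).getLast? = some '/' then (pvGlue Tall).dropLast else pvGlue Tall)
      = ['/'].intercalate Tall := by
    by_cases hT : Tall = []
    · rw [hT]; simp [pvGlue, List.intercalate]
    · rw [if_pos (pvGlue_last Tall hT), pvGlue_dropLast]
  -- A's key equals the same intercalation, as a string
  have hA : PySem.Str.join "/" (parts.foldl (fun acc part => acc ++ split_parts part) [])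
      = String.ofList (['/'].intercalate Tall) := by
    rw [pv_foldl_flatten, List.nil_append]
    have h1 : parts.map split_parts = parts.map (fun p => (pvSp p.toList).map String.ofList) :=
      List.map_congr_left (fun p _ => pv_split_parts_eq p)
    rw [h1]
    have h2 : ((parts.map (fun p => (pvSp p.toList).map String.ofList)).flatten)
        = Tall.map String.ofList := by
      rw [hTall, List.map_flatten]
      simp [Function.comp_def]
    rw [h2]
    simp only [PySem.Str.join, PySem.Chars.join]
    congr 1
    simp [Function.comp_def, String.toList_ofList]
  simp only [hout, hout2, hA]
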